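-- pv_equiv track=rewrite | github.com/ameyashete/CS-61A | typing_test.py | swap_score
-- ===== SOURCE A (Python) =====
-- def swap_score(string_1, string_2):
--     if not string_1 or not string_2:
--         return 0
--     elif string_1 == string_2:
--         return 0
--     else:
--         if string_1[0] != string_2[0]:
--             return 1 + swap_score(string_1[1:], string_2[1:])
--         elif string_1[0]  == string_2[0]:
--             return swap_score(string_1[1:], string_2[1:])
-- ===== SOURCE B (Python) =====
-- def swap_score(string_1, string_2):
--     n = min(len(string_1), len(string_2))
--     count = 0
--     for i in range(n):
--         if string_1[i] != string_2[i]: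
--             count += 1
--     return count
-- ===== Notes on version B (the rewrite author's own statement) =====
-- stated objective: faster
-- what changed: Replaced A's recursion over string suffixes (repeated slicing with guard branches and a redundant whole-string equality test at every step) with a single indexed loop up to the shorter length accumulating the mismatch count.
import Mathlib
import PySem

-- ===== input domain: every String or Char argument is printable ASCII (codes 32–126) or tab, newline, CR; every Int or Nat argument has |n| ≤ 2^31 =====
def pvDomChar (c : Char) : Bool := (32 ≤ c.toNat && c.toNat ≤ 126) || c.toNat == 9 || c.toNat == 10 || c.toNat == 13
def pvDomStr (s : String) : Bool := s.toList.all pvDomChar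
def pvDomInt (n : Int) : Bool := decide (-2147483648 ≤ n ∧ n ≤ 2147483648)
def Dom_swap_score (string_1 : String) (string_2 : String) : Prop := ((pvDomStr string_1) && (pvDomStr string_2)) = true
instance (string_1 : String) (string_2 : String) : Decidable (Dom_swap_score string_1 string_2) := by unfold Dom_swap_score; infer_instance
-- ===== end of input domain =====

-- B replaces A's recursion over string suffixes with one indexed loop up to the shorter length (simpler).
-- ===== PORT A =====
def swapScoreAux : List Char → List Char → Int
  | [], _ => 0
  | _, [] => 0
  | c :: as, d :: bs =>
    if c :: as = d :: bs then 0
    else if c ≠ d then 1 + swapScoreAux as bs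
    else swapScoreAux as bs

def swap_score (string_1 : String) (string_2 : String) : Int :=
  swapScoreAux string_1.toList string_2.toList

-- ===== PORT B =====
-- indices i < min of the lengths are always in range, so getD with a dummy default is exact here
def swap_score_alt (string_1 : String) (string_2 : String) : Int :=
  let l1 := string_1.toList
  let l2 := string_2.toList
  let n := min l1.length l2.length
  (List.range n).foldl (fun count i => if l1.getD i ' ' ≠ l2.getD i ' ' then count + 1 else count) 0

-- ===== PRECONDITION & SPEC =====
def Spec_swap_score (string_1 : String) (string_2 : String) (out : Int) : Prop := out = swap_score_alt string_1 string_2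
instance (string_1 : String) (string_2 : String) (out : Int) : Decidable (Spec_swap_score string_1 string_2 out) := by unfold Spec_swap_score; infer_instance

-- ===== CLAIM (what is proved, stated in full; the proofs are below) =====
def Claim_equal_swap_score : Prop := ∀ (string_1 : String) (string_2 : String), Dom_swap_score string_1 string_2 → Spec_swap_score string_1 string_2 (swap_score string_1 string_2)

-- ===== LEMMAS AND PROOFS =====

-- ===== VERDICT (by name: the statement is the Claim_ definition above) =====
def mismatches : List Char → List Char → Int
  | c :: as, d :: bs => (if c ≠ d then 1 else 0) + mismatches as bs
  | _, _ => 0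

theorem mismatches_self (a : List Char) : mismatches a a = 0 := by
  induction a with
  | nil => rfl
  | cons c as ih => simp [mismatches, ih]

theorem swapScoreAux_eq (a b : List Char) : swapScoreAux a b = mismatches a b := by
  induction a generalizing b with
  | nil => cases b <;> rfl
  | cons c as ih =>
    cases b with
    | nil => rfl
    | cons d bs =>
      by_cases h : c :: as = d :: bs
      · obtain ⟨rfl, rfl⟩ := by simpa using h
        simp [swapScoreAux, mismatches_self]
      · by_cases hcd : c = d
        · subst hcd
          have hne : as ≠ bs := fun he => h (by rw [he])
          simp [swapScoreAux, h, ih, mismatches, hne]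
        · simp [swapScoreAux, h, hcd, ih, mismatches]

theorem foldl_eq (a b : List Char) (acc : Int) :
    (List.range (min a.length b.length)).foldl
      (fun count i => if a.getD i ' ' ≠ b.getD i ' ' then count + 1 else count) acc
    = acc + mismatches a b := by
  induction a generalizing b acc with
  | nil => simp [mismatches]
  | cons c as ih =>
    cases b with
    | nil => simp [mismatches]
    | cons d bs =>
      have : min (c :: as).length (d :: bs).length = min as.length bs.length + 1 := by
        simp [Nat.succ_min_succ]
      rw [this, List.range_succ_eq_map]
      simp only [List.foldl_cons, List.foldl_map, List.getD_cons_succ, List.getD_cons_zero]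
      rw [ih]
      by_cases hcd : c = d <;> simp [mismatches, hcd] <;> ring

theorem swap_score_spec : Claim_equal_swap_score := by
  intro s1 s2 _
  unfold Spec_swap_score swap_score swap_score_alt
  rw [swapScoreAux_eq, foldl_eq]
  simp
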